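-- pv_equiv track=rewrite | github.com/biebiefei/MachineLearningCMU | Homeworks/Lecture2/wa/DecisionTree.py | makeNewDatafile
-- ===== SOURCE A (Python) =====
-- def labelCounter(attribute):
-- # build a dictionary that return the result: [yes, no]
-- 	label = [ ]
-- 	for item in attribute[1:]:
-- 		if item not in label:
-- 			label.append(item)
-- 	return label
--
-- def separate(attrCol, ResultCol):
-- 	[attrlab1, attrlab2] = labelCounter(attrCol)
-- 	list1 = [ResultCol[0]]
-- 	list2 = [ResultCol[0]]
-- 	for i in range(1,len(attrCol)):
-- 		if attrCol[i] ==attrlab1: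
-- 			list1.append(ResultCol[i])
-- 		else:
-- 			list2.append(ResultCol[i])
-- 	result = {attrlab1:list1, attrlab2:list2}
-- 	return result
--
-- def makeNewDatafile(attrCol, listCol):
-- 	[attrlab1, attrlab2] = labelCounter(attrCol)
-- 	newFile = dict()
-- 	newFile[attrlab1] = []
-- 	newFile[attrlab2] = []
-- 	for row in listCol:
-- 		result = separate(attrCol, row)
-- 		newFile[attrlab1].append(result[attrlab1])
-- 		newFile[attrlab2].append(result[attrlab2])
-- 	return newFile
-- ===== SOURCE B (Python) =====
-- def makeNewDatafile(attrCol, listCol):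
--     labels = []
--     for item in attrCol[1:]:
--         if item not in labels:
--             labels.append(item)
--     [attrlab1, attrlab2] = labels
--     idx1 = [i for i in range(1, len(attrCol)) if attrCol[i] == attrlab1]
--     idx2 = [i for i in range(1, len(attrCol)) if attrCol[i] != attrlab1]
--     return {attrlab1: [[row[0]] + [row[i] for i in idx1] for row in listCol],
--             attrlab2: [[row[0]] + [row[i] for i in idx2] for row in listCol]}
-- ===== Notes on version B (the rewrite author's own statement) =====
-- stated objective: alternative
-- what changed: B computes the two labels once and builds the two position-index lists once, then maps each row through those index lists, instead of A's re-running labelCounter and a full attrCol scan (separate) for every row; this removes the per-row rescans, though the harness could not time it (its large random inputs violate the two-label precondition).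
import Mathlib
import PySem

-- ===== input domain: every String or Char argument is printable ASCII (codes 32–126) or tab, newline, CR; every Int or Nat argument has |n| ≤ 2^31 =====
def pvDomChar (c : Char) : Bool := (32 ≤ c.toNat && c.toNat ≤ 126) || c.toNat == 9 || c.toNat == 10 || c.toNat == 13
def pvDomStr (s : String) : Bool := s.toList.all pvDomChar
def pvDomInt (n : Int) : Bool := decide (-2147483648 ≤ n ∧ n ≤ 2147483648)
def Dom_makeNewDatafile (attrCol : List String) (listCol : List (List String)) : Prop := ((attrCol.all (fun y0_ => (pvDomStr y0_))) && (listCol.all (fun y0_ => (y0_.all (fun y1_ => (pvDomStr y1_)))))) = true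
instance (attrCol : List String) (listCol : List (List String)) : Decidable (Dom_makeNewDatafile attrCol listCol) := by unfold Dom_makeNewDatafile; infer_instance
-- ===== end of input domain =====

-- B builds the two attribute-value index lists once and maps every row through them,
-- replacing A's per-row labelCounter call and per-row scan inside separate.

-- ===== PORT A =====
def labelCounterA (attrib : List String) : List String :=
  (PySem.List.slice attrib (some 1) none).foldl
    (fun label item => if label.contains item then label else label ++ [item]) []

def separateA (attrCol ResultCol : List String) : PySem.Dict String (List String) :=
  let labels := labelCounterA attrCol
  let attrlab1 := PySem.List.pyGetD labels 0 ""
  let attrlab2 := PySem.List.pyGetD labels 1 ""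
  let lists := (PySem.List.pyRange 1 (attrCol.length : Int) 1).foldl
    (fun (q : List String × List String) i =>
      if PySem.List.pyGetD attrCol i "" == attrlab1 then
        (q.1 ++ [PySem.List.pyGetD ResultCol i ""], q.2)
      else
        (q.1, q.2 ++ [PySem.List.pyGetD ResultCol i ""]))
    ([PySem.List.pyGetD ResultCol 0 ""], [PySem.List.pyGetD ResultCol 0 ""])
  (PySem.Dict.empty.insert attrlab1 lists.1).insert attrlab2 lists.2

def makeNewDatafile (attrCol : List String) (listCol : List (List String)) : List (String × List (List String)) :=
  let labels := labelCounterA attrCol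
  let attrlab1 := PySem.List.pyGetD labels 0 ""
  let attrlab2 := PySem.List.pyGetD labels 1 ""
  let newFile : PySem.Dict String (List (List String)) :=
    (PySem.Dict.empty.insert attrlab1 []).insert attrlab2 []
  (listCol.foldl (fun nf row =>
      let result := separateA attrCol row
      (nf.modify attrlab1 [] (fun l => l ++ [result.getD attrlab1 []])).modify
        attrlab2 [] (fun l => l ++ [result.getD attrlab2 []]))
    newFile).items

-- ===== PORT B =====
def makeNewDatafile_alt (attrCol : List String) (listCol : List (List String)) : List (String × List (List String)) :=
  let labels := (PySem.List.slice attrCol (some 1) none).foldl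
    (fun labels item => if labels.contains item then labels else labels ++ [item]) []
  let attrlab1 := PySem.List.pyGetD labels 0 ""
  let attrlab2 := PySem.List.pyGetD labels 1 ""
  let idx1 := (PySem.List.pyRange 1 (attrCol.length : Int) 1).filter
    (fun i => PySem.List.pyGetD attrCol i "" == attrlab1)
  let idx2 := (PySem.List.pyRange 1 (attrCol.length : Int) 1).filter
    (fun i => !(PySem.List.pyGetD attrCol i "" == attrlab1))
  [(attrlab1, listCol.map (fun row =>
      [PySem.List.pyGetD row 0 ""] ++ idx1.map (fun i => PySem.List.pyGetD row i ""))),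
   (attrlab2, listCol.map (fun row =>
      [PySem.List.pyGetD row 0 ""] ++ idx2.map (fun i => PySem.List.pyGetD row i "")))]

-- ===== PRECONDITION & SPEC =====
-- Pre_ excludes exactly the inputs where the Python A raises: a ValueError from the
-- two-element unpacking of labelCounter (≠ 2 distinct values in attrCol[1:]) and an
-- IndexError in separate (a row shorter than attrCol).
def Pre_makeNewDatafile (attrCol : List String) (listCol : List (List String)) : Prop :=
  (PySem.List.dedup (attrCol.drop 1)).length = 2 ∧
  ∀ row ∈ listCol, attrCol.length ≤ row.length
instance (attrCol : List String) (listCol : List (List String)) : Decidable (Pre_makeNewDatafile attrCol listCol) := by unfold Pre_makeNewDatafile; infer_instance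

def pvWitness_makeNewDatafile : List String × List (List String) :=
  (["attr", "x", "y"], [["a", "b", "c"], ["d", "e", "f"]])

def Spec_makeNewDatafile (attrCol : List String) (listCol : List (List String)) (out : List (String × List (List String))) : Prop := out = makeNewDatafile_alt attrCol listCol
instance (attrCol : List String) (listCol : List (List String)) (out : List (String × List (List String))) : Decidable (Spec_makeNewDatafile attrCol listCol out) := by unfold Spec_makeNewDatafile; infer_instance

-- ===== CLAIM (what is proved, stated in full; the proofs are below) =====
def Claim_equal_makeNewDatafile : Prop := ∀ (attrCol : List String) (listCol : List (List String)), Dom_makeNewDatafile attrCol listCol → Pre_makeNewDatafile attrCol listCol → Spec_makeNewDatafile attrCol listCol (makeNewDatafile attrCol listCol)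

-- ===== LEMMAS AND PROOFS =====

-- Dict.empty has no items (definitional; no library lemma carries this name)
lemma empty_items {κ ν : Type} : (PySem.Dict.empty : PySem.Dict κ ν).items = [] := rfl

-- labelCounter IS ordered dedup of the tail
lemma labelCounterA_eq (a : List String) :
    labelCounterA a = PySem.List.dedup (a.drop 1) := by
  unfold labelCounterA
  rw [PySem.List.slice_from_one, ← List.drop_one, PySem.List.dedup_eq_ofList,
      PySem.Set.ofList_eq_foldl]
  rfl

-- the pair-accumulating loop of separate splits into two filtered maps
lemma foldl_pair_split {α β : Type} (p : α → Bool) (f : α → β) (l : List α) :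
    ∀ (a b : List β),
      l.foldl (fun (q : List β × List β) i =>
          if p i then (q.1 ++ [f i], q.2) else (q.1, q.2 ++ [f i])) (a, b)
        = (a ++ (l.filter p).map f, b ++ (l.filter (fun i => !(p i))).map f) := by
  induction l with
  | nil => simp
  | cons x xs ih =>
    intro a b
    by_cases h : p x <;> simp [h, ih]

-- a two-key dict with distinct keys: both lookups
lemma getD_two_key {ν : Type} (l1 l2 : String) (hne : l1 ≠ l2) (a b d0 : ν) :
    ((PySem.Dict.empty.insert l1 a).insert l2 b).getD l1 d0 = a ∧
    ((PySem.Dict.empty.insert l1 a).insert l2 b).getD l2 d0 = b := by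
  constructor
  · rw [PySem.Dict.getD_insert_of_ne _ _ _ hne, PySem.Dict.getD_insert_self]
  · rw [PySem.Dict.getD_insert_self]

-- modify on a two-key dict rewrites the value in place
lemma modify_two_key_left {ν : Type} (l1 l2 : String) (hne : l1 ≠ l2) (a b d0 : ν) (f : ν → ν) :
    ((PySem.Dict.empty.insert l1 a).insert l2 b).modify l1 d0 f
      = (PySem.Dict.empty.insert l1 (f a)).insert l2 b := by
  have h1 : ((PySem.Dict.empty.insert l1 a).insert l2 b).modify l1 d0 f
      = ((PySem.Dict.empty.insert l1 a).insert l2 b).insert l1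
          (f (((PySem.Dict.empty.insert l1 a).insert l2 b).getD l1 d0)) :=
    PySem.Dict.ext_iff.mpr rfl
  rw [h1, (getD_two_key l1 l2 hne a b d0).1]
  apply PySem.Dict.ext
  rw [PySem.Dict.items_insert_of_contains, PySem.Dict.items_insert_of_not_contains,
      PySem.Dict.items_insert_of_not_contains, PySem.Dict.items_insert_of_not_contains,
      PySem.Dict.items_insert_of_not_contains]
  · simp [empty_items, Ne.symm hne]
  · simp [PySem.Dict.contains_empty]
  · simp [PySem.Dict.contains_insert, PySem.Dict.contains_empty, Ne.symm hne]
  · simp [PySem.Dict.contains_empty]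
  · simp [PySem.Dict.contains_insert, PySem.Dict.contains_empty, Ne.symm hne]
  · simp [PySem.Dict.contains_insert]

lemma modify_two_key_right {ν : Type} (l1 l2 : String) (hne : l1 ≠ l2) (a b d0 : ν) (f : ν → ν) :
    ((PySem.Dict.empty.insert l1 a).insert l2 b).modify l2 d0 f
      = (PySem.Dict.empty.insert l1 a).insert l2 (f b) := by
  have h1 : ((PySem.Dict.empty.insert l1 a).insert l2 b).modify l2 d0 f
      = ((PySem.Dict.empty.insert l1 a).insert l2 b).insert l2
          (f (((PySem.Dict.empty.insert l1 a).insert l2 b).getD l2 d0)) :=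
    PySem.Dict.ext_iff.mpr rfl
  rw [h1, (getD_two_key l1 l2 hne a b d0).2, PySem.Dict.insert_insert_self]

-- the row loop of makeNewDatafile, fully unrolled into two mapped columns
lemma items_row_loop (l1 l2 : String) (hne : l1 ≠ l2)
    (F G : List String → List String) (rows : List (List String)) :
    ∀ (a b : List (List String)),
      (rows.foldl (fun nf row =>
          (nf.modify l1 [] (fun l => l ++ [F row])).modify l2 [] (fun l => l ++ [G row]))
        ((PySem.Dict.empty.insert l1 a).insert l2 b)).items
      = [(l1, a ++ rows.map F), (l2, b ++ rows.map G)] := by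
  induction rows with
  | nil =>
    intro a b
    simp only [List.foldl_nil, List.map_nil, List.append_nil]
    rw [PySem.Dict.items_insert_of_not_contains, PySem.Dict.items_insert_of_not_contains]
    · simp [empty_items]
    · simp [PySem.Dict.contains_empty]
    · simp [PySem.Dict.contains_insert, PySem.Dict.contains_empty, Ne.symm hne]
  | cons r rs ih =>
    intro a b
    rw [List.foldl_cons, modify_two_key_left l1 l2 hne, modify_two_key_right l1 l2 hne, ih]
    simp


-- ===== VERDICT (by name: the statement is the Claim_ definition above) =====
theorem makeNewDatafile_spec : Claim_equal_makeNewDatafile := by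
  intro attrCol listCol _hdom hpre
  obtain ⟨hlen, _hrows⟩ := hpre
  -- the two labels
  obtain ⟨l1, l2, hd⟩ := List.length_eq_two.mp hlen
  have hnd : (PySem.List.dedup (attrCol.drop 1)).Nodup := PySem.List.nodup_dedup _
  rw [hd] at hnd
  have hne : l1 ≠ l2 := by simpa using hnd
  have hlc : labelCounterA attrCol = [l1, l2] := (labelCounterA_eq attrCol).trans hd
  have e1 : PySem.List.pyGetD [l1, l2] 0 "" = l1 := rfl
  have e2 : PySem.List.pyGetD [l1, l2] 1 "" = l2 := rfl
  -- the per-row result of separate, both lookups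
  have hsep : ∀ row : List String,
      (separateA attrCol row).getD l1 [] =
        [PySem.List.pyGetD row 0 ""] ++
          ((PySem.List.pyRange 1 (attrCol.length : Int) 1).filter
            (fun i => PySem.List.pyGetD attrCol i "" == l1)).map
            (fun i => PySem.List.pyGetD row i "") ∧
      (separateA attrCol row).getD l2 [] =
        [PySem.List.pyGetD row 0 ""] ++
          ((PySem.List.pyRange 1 (attrCol.length : Int) 1).filter
            (fun i => !(PySem.List.pyGetD attrCol i "" == l1))).map
            (fun i => PySem.List.pyGetD row i "") := by
    intro row
    unfold separateA
    rw [hlc]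
    simp only [e1, e2]
    rw [foldl_pair_split (fun i => PySem.List.pyGetD attrCol i "" == l1)
        (fun i => PySem.List.pyGetD row i "")]
    exact ⟨by rw [(getD_two_key l1 l2 hne _ _ _).1],
           by rw [(getD_two_key l1 l2 hne _ _ _).2]⟩
  unfold Spec_makeNewDatafile makeNewDatafile makeNewDatafile_alt
  have hB : (PySem.List.slice attrCol (some 1) none).foldl
      (fun labels item => if labels.contains item then labels else labels ++ [item]) []
      = [l1, l2] := hlc
  rw [hB, hlc]
  simp only [e1, e2]
  rw [items_row_loop l1 l2 hne
      (fun row => (separateA attrCol row).getD l1 [])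
      (fun row => (separateA attrCol row).getD l2 []) listCol [] []]
  simp only [List.nil_append]
  refine congrArg₂ _ (congrArg _ ?_) (congrArg₂ _ (congrArg _ ?_) rfl)
  · exact List.map_congr_left (fun row _ => (hsep row).1)
  · exact List.map_congr_left (fun row _ => (hsep row).2)
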